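-- pv_equiv track=rewrite | github.com/paavkar/Python-Programming-MOOC-2023 | Part 7/part07-02_special_characters/src/special_characters.py | separate_characters
-- ===== SOURCE A (Python) =====
-- from string import ascii_letters, punctuation
--
-- def separate_characters(my_string: str):
--     ascii = ""
--     punct = ""
--     other = ""
--     for char in my_string:
--         if char in ascii_letters:
--             ascii += char
--         elif(char in punctuation):
--             punct += char
--         else:
--             other += char
--     return (ascii, punct, other)
-- ===== SOURCE B (Python) =====
-- from string import ascii_letters, punctuation
--
-- def separate_characters(my_string: str):
--     ascii = "".join(c for c in my_string if c in ascii_letters)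
--     punct = "".join(c for c in my_string if c in punctuation)
--     other = "".join(c for c in my_string
--                     if c not in ascii_letters and c not in punctuation)
--     return (ascii, punct, other)
-- ===== Notes on version B (the rewrite author's own statement) =====
-- stated objective: idiomatic
-- what changed: Replaces the single stateful if/elif/else loop over three accumulator strings by three independent join-of-comprehension filtering passes, one per output string.
import Mathlib
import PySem

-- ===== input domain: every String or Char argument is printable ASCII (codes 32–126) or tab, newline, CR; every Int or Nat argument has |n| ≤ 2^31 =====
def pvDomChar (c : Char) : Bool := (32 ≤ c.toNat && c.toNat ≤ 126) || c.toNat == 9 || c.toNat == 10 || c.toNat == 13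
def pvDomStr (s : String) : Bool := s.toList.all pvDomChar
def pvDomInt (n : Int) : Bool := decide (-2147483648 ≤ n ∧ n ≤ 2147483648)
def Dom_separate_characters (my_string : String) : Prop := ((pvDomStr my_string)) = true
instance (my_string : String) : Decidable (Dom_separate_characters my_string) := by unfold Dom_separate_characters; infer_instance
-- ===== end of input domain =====

-- B replaces A's single if/elif/else pass with three independent filtering passes (idiomatic; same cost).

-- string.ascii_letters and string.punctuation as character lists
def pyLetters : List Char := "abcdefghijklmnopqrstuvwxyzABCDEFGHIJKLMNOPQRSTUVWXYZ".toList
def pyPunct : List Char := "!\"#$%&'()*+,-./:;<=>?@[\\]^_`{|}~".toList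

-- ===== PORT A =====
-- the for-loop with its three accumulator strings (kept as char lists, turned into Strings on return)
def sepLoopA : List Char → List Char → List Char → List Char → String × String × String
  | [], a, p, o => (String.ofList a, String.ofList p, String.ofList o)
  | c :: rest, a, p, o =>
    if pyLetters.contains c then sepLoopA rest (a ++ [c]) p o
    else if pyPunct.contains c then sepLoopA rest a (p ++ [c]) o
    else sepLoopA rest a p (o ++ [c])

def separate_characters (my_string : String) : String × String × String :=
  sepLoopA my_string.toList [] [] []

-- ===== PORT B =====
-- three independent filters, one per output string
def separate_characters_alt (my_string : String) : String × String × String :=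
  (String.ofList (my_string.toList.filter (fun c => pyLetters.contains c)),
   String.ofList (my_string.toList.filter (fun c => pyPunct.contains c)),
   String.ofList (my_string.toList.filter (fun c => !pyLetters.contains c && !pyPunct.contains c)))

-- ===== PRECONDITION & SPEC =====
def Spec_separate_characters (my_string : String) (out : String × String × String) : Prop := out = separate_characters_alt my_string
instance (my_string : String) (out : String × String × String) : Decidable (Spec_separate_characters my_string out) := by unfold Spec_separate_characters; infer_instance

-- ===== CLAIM (what is proved, stated in full; the proofs are below) =====
def Claim_equal_separate_characters : Prop := ∀ (my_string : String), Dom_separate_characters my_string → Spec_separate_characters my_string (separate_characters my_string)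

-- ===== LEMMAS AND PROOFS =====

-- ascii_letters and punctuation are disjoint
lemma letters_punct_disjoint : pyLetters.all (fun c => !pyPunct.contains c) = true := by decide

lemma punct_of_letter {c : Char} (h : c ∈ pyLetters) : c ∉ pyPunct := by
  have := List.all_eq_true.mp letters_punct_disjoint c h
  simpa using this

lemma sepLoopA_eq (l a p o : List Char) :
    sepLoopA l a p o =
      (String.ofList (a ++ l.filter (fun c => pyLetters.contains c)),
       String.ofList (p ++ l.filter (fun c => pyPunct.contains c)),
       String.ofList (o ++ l.filter (fun c => !pyLetters.contains c && !pyPunct.contains c))) := by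
  induction l generalizing a p o with
  | nil => simp [sepLoopA]
  | cons c rest ih =>
    by_cases hl : c ∈ pyLetters
    · have hp := punct_of_letter hl
      simp [sepLoopA, hl, hp, ih]
    · by_cases hp : c ∈ pyPunct
      · simp [sepLoopA, hl, hp, ih]
      · simp [sepLoopA, hl, hp, ih]

-- ===== VERDICT (by name: the statement is the Claim_ definition above) =====
theorem separate_characters_spec : Claim_equal_separate_characters := by
  intro s _
  show _ = _
  simp [separate_characters, separate_characters_alt, sepLoopA_eq]
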